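-- pv_equiv track=rewrite | github.com/BeatrizCanaverde/SEQUOR | pipeline/create_tuples/plot_judge_agreement.py | compute_cumulative_counts
-- ===== SOURCE A (Python) =====
-- def compute_cumulative_counts(tuple_judge_yes_counts):
--     """
--     Calculate cumulative counts: for each Yes vote threshold,
--     count constraint tuples where ALL judges have yes_count >= that threshold.
--
--     Args:
--         tuple_judge_yes_counts: Dict mapping constraint_tuple -> dict of {judge_idx: yes_count}
--
--     Returns:
--         threshold_points (list), cumulative_counts (list)
--     """
--     threshold_points = list(range(0, 101))  # Thresholds from 0 to 100 Yes votes
--     cumulative_counts = []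
--
--     for threshold in threshold_points:
--         # Count tuples where ALL judges have yes_count >= threshold
--         count = sum(
--             1 for judge_yes_counts in tuple_judge_yes_counts.values()
--             if all(cnt >= threshold for cnt in judge_yes_counts.values())
--         )
--         cumulative_counts.append(count)
--
--     return threshold_points, cumulative_counts
-- ===== SOURCE B (Python) =====
-- def compute_cumulative_counts(tuple_judge_yes_counts):
--     # One pass over the tuples: bucket each tuple by its (capped) minimum yes_count,
--     # then build the cumulative counts by a single suffix sum over the 101 thresholds.
--     hist = [0] * 101
--     for judge_yes_counts in tuple_judge_yes_counts.values():
--         vals = list(judge_yes_counts.values())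
--         b = 100 if not vals else min(100, min(vals))
--         if b >= 0:
--             hist[b] += 1
--     cumulative_counts = []
--     running = 0
--     for t in range(100, -1, -1):
--         running += hist[t]
--         cumulative_counts.append(running)
--     cumulative_counts.reverse()
--     return list(range(0, 101)), cumulative_counts
-- ===== Notes on version B (the rewrite author's own statement) =====
-- stated objective: faster
-- what changed: Instead of rescanning every tuple's judge counts for each of the 101 thresholds, B makes one pass bucketing each tuple by its capped minimum yes_count into a 101-slot histogram and produces the cumulative counts by a single suffix sum.
import Mathlib
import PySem

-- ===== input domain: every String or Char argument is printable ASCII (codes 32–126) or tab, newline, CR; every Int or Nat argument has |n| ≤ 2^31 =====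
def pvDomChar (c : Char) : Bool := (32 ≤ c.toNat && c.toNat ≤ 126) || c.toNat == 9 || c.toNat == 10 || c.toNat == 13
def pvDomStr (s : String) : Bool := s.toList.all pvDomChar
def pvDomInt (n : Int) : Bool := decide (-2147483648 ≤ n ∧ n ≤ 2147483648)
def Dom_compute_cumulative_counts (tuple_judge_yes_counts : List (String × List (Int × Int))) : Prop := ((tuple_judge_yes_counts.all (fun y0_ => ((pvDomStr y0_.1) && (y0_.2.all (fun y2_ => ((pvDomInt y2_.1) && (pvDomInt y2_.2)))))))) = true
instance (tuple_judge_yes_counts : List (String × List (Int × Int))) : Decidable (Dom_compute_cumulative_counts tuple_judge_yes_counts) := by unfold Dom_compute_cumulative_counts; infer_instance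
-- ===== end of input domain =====

-- B replaces the per-threshold rescan of all judge counts by a one-pass bucket histogram
-- over each tuple's capped minimum yes_count followed by a single suffix sum (constant-factor faster).


-- ===== PORT A =====
-- literal port of A: for each threshold 0..100, count dict values whose inner dict values all pass
def compute_cumulative_counts (tuple_judge_yes_counts : List (String × List (Int × Int))) : List Int × List Int :=
  let threshold_points := PySem.List.pyRange 0 101 1
  let cumulative_counts := threshold_points.foldl (fun acc threshold =>
    acc ++ [((PySem.Dict.ofList tuple_judge_yes_counts).values.foldl
        (fun s judge_yes_counts =>
          if (PySem.Dict.ofList judge_yes_counts).values.all (fun cnt => decide (threshold ≤ cnt)) then s + 1 else s)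
        (0 : Int))]) []
  (threshold_points, cumulative_counts)

-- ===== PORT B =====
-- literal port of Source B: one bucketing pass into a 101-slot histogram, then a suffix-sum countdown
def compute_cumulative_counts_alt (tuple_judge_yes_counts : List (String × List (Int × Int))) : List Int × List Int :=
  let hist := (PySem.Dict.ofList tuple_judge_yes_counts).values.foldl
    (fun (hist : List Int) (judge_yes_counts : List (Int × Int)) =>
      let vals := (PySem.Dict.ofList judge_yes_counts).values
      let b : Int := match PySem.List.min? vals (fun x => x) with
        | none => 100
        | some m => min 100 m
      if 0 ≤ b then hist.set b.toNat (PySem.List.pyGetD hist b 0 + 1) else hist)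
    (List.replicate 101 (0 : Int))
  let p := (PySem.List.pyRange 100 (-1) (-1)).foldl
    (fun (st : List Int × Int) t =>
      let running := st.2 + PySem.List.pyGetD hist t 0
      (st.1 ++ [running], running))
    (([] : List Int), (0 : Int))
  (PySem.List.pyRange 0 101 1, p.1.reverse)

-- ===== PRECONDITION & SPEC =====
def Spec_compute_cumulative_counts (tuple_judge_yes_counts : List (String × List (Int × Int))) (out : List Int × List Int) : Prop := out = compute_cumulative_counts_alt tuple_judge_yes_counts
instance (tuple_judge_yes_counts : List (String × List (Int × Int))) (out : List Int × List Int) : Decidable (Spec_compute_cumulative_counts tuple_judge_yes_counts out) := by unfold Spec_compute_cumulative_counts; infer_instance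

-- ===== CLAIM (what is proved, stated in full; the proofs are below) =====
def Claim_equal_compute_cumulative_counts : Prop := ∀ (tuple_judge_yes_counts : List (String × List (Int × Int))), Dom_compute_cumulative_counts tuple_judge_yes_counts → Spec_compute_cumulative_counts tuple_judge_yes_counts (compute_cumulative_counts tuple_judge_yes_counts)

-- ===== LEMMAS AND PROOFS =====

-- the capped minimum bucket of one inner dict (proof-side name for the expression inlined in B's port)
def pvBucket (judge_yes_counts : List (Int × Int)) : Int :=
  match PySem.List.min? (PySem.Dict.ofList judge_yes_counts).values (fun x => x) with
  | none => 100
  | some m => min 100 m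

lemma pvBucket_le (d : List (Int × Int)) : pvBucket d ≤ 100 := by
  unfold pvBucket
  cases h : PySem.List.min? (PySem.Dict.ofList d).values (fun x => x) with
  | none => simp
  | some m => exact min_le_left _ _

-- all judge counts ≥ t  ↔  t ≤ bucket, for thresholds t ≤ 100
lemma all_ge_eq_le_bucket (d : List (Int × Int)) (t : Int) (ht : t ≤ 100) :
    ((PySem.Dict.ofList d).values.all (fun cnt => decide (t ≤ cnt))) = decide (t ≤ pvBucket d) := by
  unfold pvBucket
  cases h : PySem.List.min? (PySem.Dict.ofList d).values (fun x => x) with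
  | none =>
      have hnil : (PySem.Dict.ofList d).values = [] := (PySem.List.min?_eq_none_iff _ _).mp h
      simp [hnil, ht]
  | some m =>
      have hmem : m ∈ (PySem.Dict.ofList d).values := PySem.List.min?_mem h
      have hmin : ∀ y ∈ (PySem.Dict.ofList d).values, m ≤ y := fun y hy => PySem.List.min?_isMin h y hy
      by_cases htm : t ≤ m
      · have hall : (PySem.Dict.ofList d).values.all (fun cnt => decide (t ≤ cnt)) = true :=
          List.all_eq_true.mpr (fun y hy => by simpa using le_trans htm (hmin y hy))
        rw [hall]; symm; simp; omega
      · have hall : (PySem.Dict.ofList d).values.all (fun cnt => decide (t ≤ cnt)) = false :=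
          List.all_eq_false.mpr ⟨m, hmem, by simpa using htm⟩
        rw [hall]; symm; simp; omega

-- set on a map over range
lemma set_map_range (n k : Nat) (f : Nat → Int) (v : Int) (hk : k < n) :
    ((List.range n).map f).set k v = (List.range n).map (fun j => if j = k then v else f j) := by
  apply List.ext_getElem
  · simp
  · intro i h1 h2
    by_cases hik : i = k
    · subst hik
      simp
    · have hki : k ≠ i := fun hh => hik hh.symm
      simp [hki, hik]

-- one bucketing step of B on a histogram given as a map over range 101
lemma hist_step (f : Nat → Int) (d : List (Int × Int)) :
    (let vals := (PySem.Dict.ofList d).values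
     let b : Int := match PySem.List.min? vals (fun x => x) with
        | none => 100
        | some m => min 100 m
     if 0 ≤ b then ((List.range 101).map f).set b.toNat
         (PySem.List.pyGetD ((List.range 101).map f) b 0 + 1)
     else ((List.range 101).map f))
    = (List.range 101).map (fun (j : Nat) => if (j : Int) = pvBucket d then f j + 1 else f j) := by
  show (if 0 ≤ pvBucket d then
          ((List.range 101).map f).set (pvBucket d).toNat
            (PySem.List.pyGetD ((List.range 101).map f) (pvBucket d) 0 + 1)
        else ((List.range 101).map f))
      = (List.range 101).map (fun (j : Nat) => if (j : Int) = pvBucket d then f j + 1 else f j)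
  have hble := pvBucket_le d
  by_cases hb : 0 ≤ pvBucket d
  · rw [if_pos hb]
    have hlt : (pvBucket d).toNat < 101 := by omega
    have hget : PySem.List.pyGetD ((List.range 101).map f) (pvBucket d) 0
        = f (pvBucket d).toNat := by
      rw [PySem.List.pyGetD_eq_getElem _ _ hb (by simp; omega)]
      simp
    rw [hget, set_map_range _ _ _ _ hlt]
    apply List.map_congr_left
    intro j hj
    have hj101 : j < 101 := List.mem_range.mp hj
    by_cases hjb : (j : Int) = pvBucket d
    · have : j = (pvBucket d).toNat := by omega
      simp [this, hb]
    · have : j ≠ (pvBucket d).toNat := by omega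
      simp [this, hjb]
  · rw [if_neg hb]
    symm
    apply List.map_congr_left
    intro j hj
    have hjb : ¬ ((j : Int) = pvBucket d) := by omega
    simp [hjb]

-- histogram characterization: folding B's bucketing step over V adds, at index j,
-- the number of elements of V whose bucket equals j
lemma hist_char (V : List (List (Int × Int))) : ∀ (f : Nat → Int),
    V.foldl (fun (hist : List Int) (judge_yes_counts : List (Int × Int)) =>
      let vals := (PySem.Dict.ofList judge_yes_counts).values
      let b : Int := match PySem.List.min? vals (fun x => x) with
        | none => 100
        | some m => min 100 m
      if 0 ≤ b then hist.set b.toNat (PySem.List.pyGetD hist b 0 + 1) else hist)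
      ((List.range 101).map f)
    = (List.range 101).map (fun j => f j + ((V.map pvBucket).count ((j : Nat) : Int) : Int)) := by
  intro f
  induction V generalizing f with
  | nil => simp
  | cons d V ih =>
      rw [List.foldl_cons, hist_step f d, ih]
      apply List.map_congr_left
      intro j hj
      have hj101 : j < 101 := List.mem_range.mp hj
      simp only [List.map_cons, List.count_cons]
      by_cases hjb : ((j : Nat) : Int) = pvBucket d
      · simp [hjb]
        ring
      · have : ¬ (pvBucket d == ((j : Nat) : Int)) = true := by simpa using fun h => hjb h.symm
        simp [hjb, this]

-- count split for the suffix sum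
lemma countP_split (bs : List Int) (t : Int) :
    (bs.countP (fun b => decide (t ≤ b))) = bs.countP (fun b => decide (t < b)) + bs.count t := by
  induction bs with
  | nil => simp
  | cons x xs ih =>
      simp only [List.countP_cons, List.count_cons, ih]
      by_cases h2 : x = t
      · subst h2; simp; omega
      · by_cases h1 : t ≤ x
        · have h3 : t < x := by omega
          simp [h1, h3, h2]
          omega
        · have h3 : ¬ (t < x) := by omega
          simp [h1, h3, h2]

lemma countP_top (bs : List Int) (hb : ∀ b ∈ bs, b ≤ 100) :
    bs.countP (fun b => decide ((100 : Int) < b)) = 0 := by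
  rw [List.countP_eq_zero]
  intro b hbm
  have := hb b hbm
  simp; omega

-- the countdown suffix-sum loop: running holds the count of buckets ≥ current threshold
lemma countdown (hist : List Int) (bs : List Int)
    (hh : ∀ t : Int, 0 ≤ t → t ≤ 100 → PySem.List.pyGetD hist t 0 = (bs.count t : Int)) :
    ∀ (n : Nat), n ≤ 100 → ∀ (cc0 : List Int) (r0 : Int),
      r0 = (bs.countP (fun b => decide ((n : Int) < b)) : Int) →
      (PySem.List.pyRange (n : Int) (-1) (-1)).foldl
        (fun (st : List Int × Int) t =>
          let running := st.2 + PySem.List.pyGetD hist t 0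
          (st.1 ++ [running], running))
        (cc0, r0)
      = (cc0 ++ (PySem.List.pyRange (n : Int) (-1) (-1)).map
            (fun t => (bs.countP (fun b => decide (t ≤ b)) : Int)),
         (bs.countP (fun b => decide ((0 : Int) ≤ b)) : Int)) := by
  intro n
  induction n with
  | zero =>
      intro _ cc0 r0 hr0
      simp only [Nat.cast_zero] at hr0 ⊢
      rw [PySem.List.pyRange_neg_one_cons (by norm_num : (-1 : Int) < 0)]
      rw [show (0 : Int) - 1 = -1 by norm_num]
      rw [PySem.List.pyRange_neg_one_eq_nil (le_refl (-1 : Int))]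
      simp only [List.foldl_cons, List.foldl_nil, List.map_cons, List.map_nil]
      have hrun : r0 + PySem.List.pyGetD hist 0 0
          = (bs.countP (fun b => decide ((0 : Int) ≤ b)) : Int) := by
        rw [hh 0 (le_refl 0) (by norm_num), hr0, countP_split bs 0]
        push_cast; ring
      simp [hrun]
  | succ m ihm =>
      intro hn cc0 r0 hr0
      push_cast at hr0 ⊢
      rw [PySem.List.pyRange_neg_one_cons (by omega : (-1 : Int) < (m : Int) + 1)]
      rw [show ((m : Int) + 1) - 1 = (m : Int) by ring]
      simp only [List.foldl_cons, List.map_cons]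
      have hfun : (fun b : Int => decide ((m : Int) < b))
          = (fun b : Int => decide ((m : Int) + 1 ≤ b)) := by
        funext b; simp only [decide_eq_decide]; omega
      have hrun : r0 + PySem.List.pyGetD hist ((m : Int) + 1) 0
          = (bs.countP (fun b => decide ((m : Int) + 1 ≤ b)) : Int) := by
        rw [hh _ (by omega) (by exact_mod_cast hn), hr0, countP_split bs ((m : Int) + 1)]
        push_cast; ring
      rw [ihm (by omega) (cc0 ++ [r0 + PySem.List.pyGetD hist ((m : Int) + 1) 0]) _
            (by rw [hrun, hfun])]
      simp [hrun]

-- ===== VERDICT (by name: the statement is the Claim_ definition above) =====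
theorem compute_cumulative_counts_spec : Claim_equal_compute_cumulative_counts := by
  intro l _
  unfold Spec_compute_cumulative_counts compute_cumulative_counts compute_cumulative_counts_alt
  simp only []
  have hble : ∀ b ∈ ((PySem.Dict.ofList l).values).map pvBucket, b ≤ 100 := by
    intro b hbm
    rcases List.mem_map.mp hbm with ⟨d, _, rfl⟩
    exact pvBucket_le d
  have hhist : (PySem.Dict.ofList l).values.foldl
      (fun (hist : List Int) (judge_yes_counts : List (Int × Int)) =>
        let vals := (PySem.Dict.ofList judge_yes_counts).values
        let b : Int := match PySem.List.min? vals (fun x => x) with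
          | none => 100
          | some m => min 100 m
        if 0 ≤ b then hist.set b.toNat (PySem.List.pyGetD hist b 0 + 1) else hist)
      (List.replicate 101 (0 : Int))
    = (List.range 101).map (fun j => (0 : Int)
        + ((((PySem.Dict.ofList l).values.map pvBucket).count ((j : Nat) : Int)) : Int)) := by
    rw [show (List.replicate 101 (0 : Int)) = (List.range 101).map (fun _ => (0 : Int)) by simp]
    exact hist_char _ (fun _ => 0)
  rw [hhist]
  have hget : ∀ t : Int, 0 ≤ t → t ≤ 100 →
      PySem.List.pyGetD ((List.range 101).map (fun j => (0 : Int)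
        + ((((PySem.Dict.ofList l).values.map pvBucket).count ((j : Nat) : Int)) : Int))) t 0
      = ((((PySem.Dict.ofList l).values.map pvBucket).count t) : Int) := by
    intro t h0 h100
    rw [PySem.List.pyGetD_eq_getElem _ _ h0 (by simp; omega)]
    simp only [List.getElem_map, List.getElem_range, Int.toNat_of_nonneg h0, zero_add]
  have hcd := countdown _ _ hget 100 (le_refl 100) [] 0
    (by rw [show ((100 : Nat) : Int) = (100 : Int) by norm_num]
        exact_mod_cast (countP_top _ hble).symm)
  rw [show ((100 : Nat) : Int) = (100 : Int) by norm_num] at hcd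
  rw [hcd]
  simp only [List.nil_append]
  rw [PySem.List.pyRange_neg_one_eq_reverse, show (-1 : Int) + 1 = 0 by norm_num,
      show (100 : Int) + 1 = 101 by norm_num]
  rw [← List.map_reverse, List.reverse_reverse]
  refine Prod.ext rfl ?_
  rw [PySem.List.foldl_append_singleton_eq_map
        (fun threshold => ((PySem.Dict.ofList l).values.foldl
          (fun s judge_yes_counts =>
            if (PySem.Dict.ofList judge_yes_counts).values.all (fun cnt => decide (threshold ≤ cnt)) then s + 1 else s)
          (0 : Int))) (PySem.List.pyRange 0 101 1) []]
  simp only [List.nil_append]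
  apply List.map_congr_left
  intro t ht
  have htb := (PySem.List.mem_pyRange_one.mp ht)
  rw [PySem.List.foldl_if_add_one
        (fun judge_yes_counts => (PySem.Dict.ofList judge_yes_counts).values.all (fun cnt => decide (t ≤ cnt)))]
  rw [List.countP_map]
  have hcc : List.countP ((fun b => decide (t ≤ b)) ∘ pvBucket) (PySem.Dict.ofList l).values
      = List.countP (fun judge_yes_counts =>
          (PySem.Dict.ofList judge_yes_counts).values.all (fun cnt => decide (t ≤ cnt)))
          (PySem.Dict.ofList l).values := by
    apply List.countP_congr
    intro d _
    simp only [Function.comp_apply]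
    rw [all_ge_eq_le_bucket d t (by omega)]
  rw [hcc]
  ring
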